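-- pv_equiv track=rewrite | github.com/Jinanrachid/DS_chatbot | scrape_website.py | is_redundant_url
-- ===== SOURCE A (Python) =====
-- def is_redundant_url(dict_of_urls):
--     """Check if the urls in the sitemap are redundant."""
--     urls_set = set()
--     count = 0
--     for urls in dict_of_urls.values():
--         for url in urls:
--             if url in urls_set:
--                 count += 1
--             else:
--                 urls_set.add(url)
--     if count > 0:
--         return True
--     return False
-- ===== SOURCE B (Python) =====
-- def is_redundant_url(dict_of_urls):
--     """Check if the urls in the sitemap are redundant."""
--     all_urls = sorted(u for urls in dict_of_urls.values() for u in urls)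
--     return any(a == b for a, b in zip(all_urls, all_urls[1:]))
-- ===== Notes on version B (the rewrite author's own statement) =====
-- stated objective: alternative
-- what changed: Replaces the seen-set with membership branch and counter by a sort-based algorithm: flatten all URL lists, sort them, and report a duplicate iff some adjacent pair in the sorted order is equal (no set, no counter).
import Mathlib
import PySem

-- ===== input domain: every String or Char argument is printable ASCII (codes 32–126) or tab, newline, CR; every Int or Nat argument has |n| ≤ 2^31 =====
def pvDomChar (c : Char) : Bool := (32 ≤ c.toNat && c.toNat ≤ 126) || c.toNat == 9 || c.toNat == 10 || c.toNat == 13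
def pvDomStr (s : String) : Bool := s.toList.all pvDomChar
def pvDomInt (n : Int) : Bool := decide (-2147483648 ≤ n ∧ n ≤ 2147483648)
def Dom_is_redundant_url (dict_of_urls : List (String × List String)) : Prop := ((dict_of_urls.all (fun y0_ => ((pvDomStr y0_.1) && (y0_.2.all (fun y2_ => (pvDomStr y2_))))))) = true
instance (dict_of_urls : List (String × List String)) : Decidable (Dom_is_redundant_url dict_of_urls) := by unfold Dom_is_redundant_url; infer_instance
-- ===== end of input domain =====

-- B replaces A's seen-set + membership branch + counter by a different algorithm: flatten, SORT, and scan adjacent pairs for an equal neighbour.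

-- ===== PORT A =====
def is_redundant_url (dict_of_urls : List (String × List String)) : Bool :=
  -- urls_set = set(); count = 0; nested for-loops with membership branch
  let st := dict_of_urls.foldl
    (fun (st : PySem.Set String × Int) kv =>
      kv.2.foldl
        (fun (st : PySem.Set String × Int) url =>
          if PySem.Set.contains st.1 url then (st.1, st.2 + 1)
          else (PySem.Set.add st.1 url, st.2))
        st)
    (PySem.Set.empty, (0 : Int))
  if st.2 > 0 then true else false

-- ===== PORT B =====
def is_redundant_url_alt (dict_of_urls : List (String × List String)) : Bool :=
  -- all_urls = sorted(u for urls in d.values() for u in urls)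
  let all_urls := PySem.List.sorted (dict_of_urls.flatMap (fun kv => kv.2)) (fun x => x) false
  -- any(a == b for a, b in zip(all_urls, all_urls[1:]))  (all_urls[1:] = drop 1, exact for a list)
  (all_urls.zip (all_urls.drop 1)).any (fun p => p.1 == p.2)

-- ===== PRECONDITION & SPEC =====
def Spec_is_redundant_url (dict_of_urls : List (String × List String)) (out : Bool) : Prop := out = is_redundant_url_alt dict_of_urls
instance (dict_of_urls : List (String × List String)) (out : Bool) : Decidable (Spec_is_redundant_url dict_of_urls out) := by unfold Spec_is_redundant_url; infer_instance

-- ===== CLAIM (what is proved, stated in full; the proofs are below) =====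
def Claim_equal_is_redundant_url : Prop := ∀ (dict_of_urls : List (String × List String)), Dom_is_redundant_url dict_of_urls → Spec_is_redundant_url dict_of_urls (is_redundant_url dict_of_urls)

-- ===== LEMMAS AND PROOFS =====

-- the inner step of A's loop
def pvStep (st : PySem.Set String × Int) (url : String) : PySem.Set String × Int :=
  if PySem.Set.contains st.1 url then (st.1, st.2 + 1)
  else (PySem.Set.add st.1 url, st.2)

-- A's counter never decreases
theorem pv_mono (l : List String) (st : PySem.Set String × Int) :
    st.2 ≤ (l.foldl pvStep st).2 := by
  induction l generalizing st with
  | nil => simp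
  | cons x t ih =>
    simp only [List.foldl_cons]
    have h := ih (pvStep st x)
    have : st.2 ≤ (pvStep st x).2 := by
      simp only [pvStep]; split <;> simp
    omega

-- A-side: the counter stays put exactly while no element repeats (relative to the seen set)
theorem pv_count_zero (l : List String) (s : PySem.Set String) (c : Int) (hs : s.Nodup) :
    (l.foldl pvStep (s, c)).2 = c ↔ ((s : List String) ++ l).Nodup := by
  induction l generalizing s c with
  | nil => simp [hs]
  | cons x t ih =>
    simp only [List.foldl_cons]
    by_cases hx : x ∈ s
    · have hstep : pvStep (s, c) x = (s, c + 1) := by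
        simp [pvStep, hx]
      rw [hstep]
      constructor
      · intro h
        have := pv_mono t (s, c + 1)
        simp at this; omega
      · intro h
        rw [List.nodup_append] at h
        exact ((h.2.2 x hx x (by simp)) rfl).elim
    · have hstep : pvStep (s, c) x = (PySem.Set.add s x, c) := by
        simp [pvStep, hx]
      rw [hstep, PySem.Set.add_of_not_mem hx]
      have hs' : ((s : List String) ++ [x]).Nodup := by
        simp [List.nodup_append, hs]
        intro a ha rfl; exact hx ha
      rw [ih (s ++ [x]) c hs']
      simp [List.append_assoc]

-- nested fold = fold over the flattened list
theorem pv_flat (d : List (String × List String)) (st : PySem.Set String × Int) :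
    d.foldl (fun st kv => kv.2.foldl pvStep st) st =
      (d.flatMap (fun kv => kv.2)).foldl pvStep st := by
  induction d generalizing st with
  | nil => simp
  | cons kv d ih => simp [List.foldl_append, ih]

-- B-side: in a ≤-sorted list, an equal adjacent pair exists iff the list has a duplicate
theorem pv_adj (s : List String) (h : s.Pairwise (· ≤ ·)) :
    ((s.zip (s.drop 1)).any (fun p => p.1 == p.2)) = !decide s.Nodup := by
  induction s with
  | nil => simp
  | cons x t ih =>
    cases t with
    | nil => simp
    | cons y t2 =>
      have htail : ((y :: t2) : List String).Pairwise (· ≤ ·) := h.tail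
      by_cases hxy : x = y
      · subst hxy
        simp [List.any_cons]
      · have hx1 : x ≤ y := (List.pairwise_cons.mp h).1 y (by simp)
        have hxt : x ∉ t2 := by
          intro hm
          have h1 : x ≤ x := le_refl x
          have hyx : y ≤ x := (List.pairwise_cons.mp htail).1 x hm
          have hxley : x ≤ y := hx1
          exact hxy (le_antisymm hxley hyx)
        have hnx : x ∉ (y :: t2) := by
          simp [hxy, hxt]
        have := ih htail
        simp only [List.drop_one, List.tail_cons, List.zip_cons_cons, List.any_cons] at *
        rw [this]
        have : decide ((x :: y :: t2) : List String).Nodup = decide ((y :: t2) : List String).Nodup := by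
          simp [List.nodup_cons, hnx]
        rw [this]
        simp [beq_iff_eq, hxy]

theorem pv_main (d : List (String × List String)) :
    is_redundant_url d = is_redundant_url_alt d := by
  unfold is_redundant_url is_redundant_url_alt
  have h1 : (fun (st : PySem.Set String × Int) (kv : String × List String) =>
      kv.2.foldl (fun st url => if PySem.Set.contains st.1 url then (st.1, st.2 + 1)
        else (PySem.Set.add st.1 url, st.2)) st) =
      (fun st kv => kv.2.foldl pvStep st) := rfl
  rw [h1, pv_flat]
  set all := d.flatMap (fun kv => kv.2) with hall
  set srt := PySem.List.sorted all (fun x => x) false with hsrt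
  have hpe : srt.Perm all := PySem.List.sorted_perm all (fun x => x) false
  have hpw : srt.Pairwise (· ≤ ·) := by
    simpa using PySem.List.sorted_pairwise all (fun x => x)
  rw [pv_adj srt hpw]
  have hnd : srt.Nodup ↔ all.Nodup := hpe.nodup_iff
  have hz := pv_count_zero all PySem.Set.empty 0 (by simp [PySem.Set.empty])
  simp only [PySem.Set.empty, List.nil_append] at hz
  have hm := pv_mono all (PySem.Set.empty, 0)
  simp only [PySem.Set.empty] at hm
  by_cases hn : all.Nodup
  · have : (all.foldl pvStep ([], 0)).2 = 0 := hz.mpr hn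
    simp [this, hnd.mpr hn]
  · have : (all.foldl pvStep ([], 0)).2 ≠ 0 := fun h => hn (hz.mp h)
    have hpos : (all.foldl pvStep ([], 0)).2 > 0 := by omega
    have hns : ¬srt.Nodup := fun h => hn (hnd.mp h)
    simp [hpos, hns]

-- ===== VERDICT (by name: the statement is the Claim_ definition above) =====
theorem is_redundant_url_spec : Claim_equal_is_redundant_url := by
  intro d _
  unfold Spec_is_redundant_url
  exact pv_main d
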